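-- pv_equiv track=rewrite | github.com/lucasibaez/mutantes | mutantes.py | vectores
-- ===== SOURCE A (Python) =====
-- def vectores(dna):
--     suma = 0
--     conTTa, conTTc, conTTg, conTTt = 0, 0, 0, 0
--     conTa, conTc, conTg, conTt = 1, 1, 1, 1
--
--     for i in range(len(dna)):
--
--
--         if dna[i] == "a":
--             if i < len(dna) - 1:
--                 if dna[i] == dna[i + 1]:
--                     conTa += 1
--
--         if dna[i] == "c":
--             if i < len(dna) - 1:
--                 if dna[i] == dna[i + 1]:
--                     conTc += 1
--
--         if dna[i] == "g":
--             if i < len(dna) - 1: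
--                 if dna[i] == dna[i + 1]:
--                     conTg += 1
--
--         if dna[i] == "t":
--             if i < len(dna) - 1:
--                 if dna[i] == dna[i + 1]:
--                     conTt += 1
--
--
--     if conTa >= 4:
--         conTTa += 1
--
--     if conTc >= 4:
--         conTTc += 1
--
--     if conTg >= 4:
--         conTTg += 1
--
--     if conTt >= 4:
--         conTTt += 1
--
--     suma = conTTa + conTTc + conTTg + conTTt
--
--
--     return suma == 1
-- ===== SOURCE B (Python) =====
-- def vectores(dna):
--     # Build runs of consecutive equal characters, then per-base pair totals:
--     # a run of length L contributes L-1 adjacent-equal pairs of its character.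
--     runs = []
--     i, n = 0, len(dna)
--     while i < n:
--         j = i + 1
--         while j < n and dna[j] == dna[i]:
--             j += 1
--         runs.append((dna[i], j - i))
--         i = j
--
--     def pairs(b):
--         return sum(L - 1 for ch, L in runs if ch == b)
--
--     return sum(1 for b in "acgt" if pairs(b) >= 3) == 1
-- ===== Notes on version B (the rewrite author's own statement) =====
-- stated objective: alternative
-- what changed: Replaces A's index loop with four seed-1 counters and four duplicated branch blocks by a run-length decomposition: group the string into runs of equal characters once, count a run of length L as L-1 pairs of its character, and return whether exactly one of the bases a/c/g/t has at least 3 pairs (equivalent to A's seed-1 counter reaching 4).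
import Mathlib
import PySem

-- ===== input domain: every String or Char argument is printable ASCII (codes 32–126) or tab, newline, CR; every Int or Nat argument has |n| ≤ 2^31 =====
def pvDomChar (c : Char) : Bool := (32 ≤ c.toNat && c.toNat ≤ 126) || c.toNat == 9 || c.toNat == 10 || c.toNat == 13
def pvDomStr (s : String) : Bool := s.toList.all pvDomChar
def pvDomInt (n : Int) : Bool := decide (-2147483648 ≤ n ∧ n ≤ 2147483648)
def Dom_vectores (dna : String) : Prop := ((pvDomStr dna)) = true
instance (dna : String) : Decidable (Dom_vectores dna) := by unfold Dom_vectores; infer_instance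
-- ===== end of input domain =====

-- B replaces A's four duplicated per-base branch blocks with a run-length decomposition
-- (runs of equal characters; a run of length L gives L-1 pairs); same result, alternative algorithm.

-- ===== PORT A =====
-- A's loop body: for index i, each of the four bases gets its nested if-chain.
def stepA (l : List Char) (n : Int) (s : Int × Int × Int × Int) (i : Int) : Int × Int × Int × Int :=
  let ca := if PySem.List.pyGetD l i ' ' == 'a' then
      (if i < n - 1 then
        (if PySem.List.pyGetD l i ' ' == PySem.List.pyGetD l (i+1) ' ' then s.1 + 1 else s.1)
      else s.1) else s.1
  let cc := if PySem.List.pyGetD l i ' ' == 'c' then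
      (if i < n - 1 then
        (if PySem.List.pyGetD l i ' ' == PySem.List.pyGetD l (i+1) ' ' then s.2.1 + 1 else s.2.1)
      else s.2.1) else s.2.1
  let cg := if PySem.List.pyGetD l i ' ' == 'g' then
      (if i < n - 1 then
        (if PySem.List.pyGetD l i ' ' == PySem.List.pyGetD l (i+1) ' ' then s.2.2.1 + 1 else s.2.2.1)
      else s.2.2.1) else s.2.2.1
  let ct := if PySem.List.pyGetD l i ' ' == 't' then
      (if i < n - 1 then
        (if PySem.List.pyGetD l i ' ' == PySem.List.pyGetD l (i+1) ' ' then s.2.2.2 + 1 else s.2.2.2)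
      else s.2.2.2) else s.2.2.2
  (ca, cc, cg, ct)

def vectores (dna : String) : Bool :=
  let l := dna.toList
  let n : Int := l.length
  let st := (PySem.List.pyRange 0 n 1).foldl (stepA l n) (1, 1, 1, 1)
  let conTTa : Int := if st.1 ≥ 4 then 1 else 0
  let conTTc : Int := if st.2.1 ≥ 4 then 1 else 0
  let conTTg : Int := if st.2.2.1 ≥ 4 then 1 else 0
  let conTTt : Int := if st.2.2.2 ≥ 4 then 1 else 0
  let suma : Int := conTTa + conTTc + conTTg + conTTt
  suma == 1

-- ===== PORT B =====
-- runs of consecutive equal characters, as (character, run length); port of Source B's while loop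
-- (scan to the end of the current run, emit it, continue past it).
def runsB : List Char → List (Char × Nat)
  | [] => []
  | c :: rest =>
      (c, (rest.takeWhile (· == c)).length + 1) :: runsB (rest.dropWhile (· == c))
termination_by l => l.length
decreasing_by
  simpa using Nat.lt_succ_of_le (List.dropWhile_sublist (· == c) (l := rest)).length_le

-- pairs(b) of Source B: total adjacent-equal pairs contributed by runs of character b
def pairsB (rs : List (Char × Nat)) (b : Char) : Nat :=
  ((rs.filter (fun r => r.1 == b)).map (fun r => r.2 - 1)).sum

def vectores_alt (dna : String) : Bool :=
  let rs := runsB dna.toList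
  ("acgt".toList.countP (fun b => decide (pairsB rs b ≥ 3))) == 1

-- ===== PRECONDITION & SPEC =====
def Spec_vectores (dna : String) (out : Bool) : Prop := out = vectores_alt dna
instance (dna : String) (out : Bool) : Decidable (Spec_vectores dna out) := by unfold Spec_vectores; infer_instance

-- ===== CLAIM (what is proved, stated in full; the proofs are below) =====
def Claim_equal_vectores : Prop := ∀ (dna : String), Dom_vectores dna → Spec_vectores dna (vectores dna)

-- ===== LEMMAS AND PROOFS =====

-- number of adjacent equal pairs of character b (common characterisation of both ports)
def cp (b : Char) : List Char → Nat
  | x :: y :: rest => (if x = b ∧ x = y then 1 else 0) + cp b (y :: rest)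
  | _ => 0

lemma cp_run (b c : Char) (t d : List Char) (ht : ∀ x ∈ t, x = c)
    (hd : ∀ e ∈ d.head?, e ≠ c) :
    cp b (c :: (t ++ d)) = (if c = b then t.length else 0) + cp b d := by
  induction t with
  | nil =>
      cases d with
      | nil => simp [cp]
      | cons e d' =>
          have hec : ¬ (c = e) := fun h => (hd e rfl) h.symm
          simp [cp, hec]
  | cons x t' ih =>
      have hx : x = c := ht x (by simp)
      rw [hx]
      have h2 := ih (fun y hy => ht y (by simp [hy]))
      have h3 : cp b (c :: ((c :: t') ++ d)) = (if c = b ∧ c = c then 1 else 0) + cp b (c :: (t' ++ d)) := rfl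
      rw [h3, h2]
      by_cases h : c = b <;> simp [h]
      omega

lemma pairsB_eq_cp (b : Char) (l : List Char) : pairsB (runsB l) b = cp b l := by
  induction l using runsB.induct with
  | case1 => simp [runsB, pairsB, cp]
  | case2 c rest ih =>
      have hsplit : rest = rest.takeWhile (· == c) ++ rest.dropWhile (· == c) :=
        (List.takeWhile_append_dropWhile).symm
      have ht : ∀ x ∈ rest.takeWhile (· == c), x = c := by
        intro x hx
        simpa using List.mem_takeWhile_imp hx
      have hd : ∀ e ∈ (rest.dropWhile (· == c)).head?, e ≠ c := by
        intro e he
        have h1 : rest.find? (fun x => !(x == c)) = some e := by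
          rw [List.find?_not_eq_head?_dropWhile, he]
        simpa using List.find?_some h1
      rw [runsB]
      conv_rhs => rw [hsplit]
      rw [cp_run b c _ _ ht hd, ← ih]
      by_cases hcb : c = b
      · simp [pairsB, hcb]
      · have hbe : (c == b) = false := by simp [hcb]
        simp [pairsB, hbe, hcb]

-- A's loop invariant: folding indices j.. over stepA adds cp of the dropped suffix to each counter
lemma foldA_inv (l : List Char) (j : Nat) (a c g t : Int) (hj : j ≤ l.length) :
    (PySem.List.pyRange (j : Int) (l.length : Int) 1).foldl (stepA l (l.length : Int)) (a, c, g, t)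
      = (a + cp 'a' (l.drop j), c + cp 'c' (l.drop j), g + cp 'g' (l.drop j), t + cp 't' (l.drop j)) := by
  have main : ∀ m j (a c g t : Int), j ≤ l.length → l.length - j = m →
      (PySem.List.pyRange (j : Int) (l.length : Int) 1).foldl (stepA l (l.length : Int)) (a, c, g, t)
        = (a + cp 'a' (l.drop j), c + cp 'c' (l.drop j), g + cp 'g' (l.drop j), t + cp 't' (l.drop j)) := by
    intro m
    induction m with
    | zero =>
        intro j a c g t hj hm
        have hje : j = l.length := by omega
        subst hje
        rw [PySem.List.pyRange_one_eq_nil (by omega)]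
        simp [cp, List.drop_length]
    | succ m ih =>
        intro j a c g t hj hm
        have hjl : j < l.length := by omega
        rw [PySem.List.pyRange_one_cons (by exact_mod_cast hjl)]
        rw [List.foldl_cons]
        have hcast : ((j : Int) + 1) = ((j + 1 : Nat) : Int) := by push_cast; ring
        have hgetj : PySem.List.pyGetD l (j : Int) ' ' = l[j] := by
          rw [PySem.List.pyGetD_natCast]; exact List.getD_eq_getElem l ' ' hjl
        have hdropj : l.drop j = l[j] :: l.drop (j+1) := List.drop_eq_getElem_cons hjl
        by_cases hlast : j + 1 < l.length
        · have hgetj1 : PySem.List.pyGetD l ((j : Int) + 1) ' ' = l[j+1] := by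
            rw [hcast, PySem.List.pyGetD_natCast]; exact List.getD_eq_getElem l ' ' hlast
          have hlt : (j : Int) < (l.length : Int) - 1 := by omega
          have hdropj1 : l.drop (j+1) = l[j+1] :: l.drop (j+2) := List.drop_eq_getElem_cons hlast
          have hcp : ∀ b, cp b (l.drop j) = (if l[j] = b ∧ l[j] = l[j+1] then 1 else 0) + cp b (l.drop (j+1)) := by
            intro b
            rw [hdropj]
            conv_lhs => rw [hdropj1]
            rw [cp]
            rw [← hdropj1]
          have comp : ∀ (b : Char) (x : Int),
              (if l[j] == b then
                (if (j : Int) < (l.length : Int) - 1 then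
                  (if l[j] == l[j+1] then x + 1 else x) else x) else x)
              = x + (if l[j] = b ∧ l[j] = l[j+1] then 1 else 0) := by
            intro b x
            by_cases h1 : l[j] = b <;> by_cases h2 : l[j] = l[j+1] <;>
              simp [h1, h2, hlt] <;> split_ifs <;> omega
          have hstep : stepA l (l.length : Int) (a, c, g, t) (j : Int)
              = (a + (if l[j] = 'a' ∧ l[j] = l[j+1] then (1:Int) else 0),
                 c + (if l[j] = 'c' ∧ l[j] = l[j+1] then (1:Int) else 0),
                 g + (if l[j] = 'g' ∧ l[j] = l[j+1] then (1:Int) else 0),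
                 t + (if l[j] = 't' ∧ l[j] = l[j+1] then (1:Int) else 0)) := by
            simp only [stepA, hgetj, hgetj1]
            rw [comp 'a' a, comp 'c' c, comp 'g' g, comp 't' t]
          rw [hstep, hcast, ih (j+1) _ _ _ _ (by omega) (by omega)]
          have e : ∀ b (x : Int),
              x + (if l[j] = b ∧ l[j] = l[j+1] then (1:Int) else 0) + (cp b (l.drop (j+1)) : Int)
              = x + (cp b (l.drop j) : Int) := by
            intro b x
            rw [hcp b]
            push_cast
            split_ifs <;> ring
          simp only [Prod.mk.injEq]
          exact ⟨e 'a' a, e 'c' c, e 'g' g, e 't' t⟩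
        · have hnlt : ¬ ((j : Int) < (l.length : Int) - 1) := by omega
          have hstep : stepA l (l.length : Int) (a, c, g, t) (j : Int) = (a, c, g, t) := by
            simp [stepA, hnlt]
          have hdrop1 : l.drop (j+1) = [] := by
            have hje : j + 1 = l.length := by omega
            rw [hje]; exact List.drop_length
          have hcp0 : ∀ b, cp b (l.drop j) = 0 := by
            intro b; rw [hdropj, hdrop1]; simp [cp]
          rw [hstep, hcast, ih (j+1) _ _ _ _ (by omega) (by omega)]
          simp [hcp0, hdrop1, cp]
  exact main (l.length - j) j a c g t hj rfl

-- 4 ≥ seed-1 counter ↔ 3 ≤ pair count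
lemma ind4 (x : Nat) : (if (1 : Int) + (x : Int) ≥ 4 then (1 : Int) else 0) = if 3 ≤ x then 1 else 0 := by
  have h : ((1 : Int) + (x : Int) ≥ 4) ↔ 3 ≤ x := by omega
  rw [if_congr h rfl rfl]

-- ===== VERDICT (by name: the statement is the Claim_ definition above) =====
theorem vectores_spec : Claim_equal_vectores := by
  intro dna _
  unfold Spec_vectores vectores vectores_alt
  have h0 := foldA_inv dna.toList 0 1 1 1 1 (by omega)
  simp only [Nat.cast_zero] at h0
  simp only [h0, List.drop_zero]
  have hacgt : "acgt".toList = ['a', 'c', 'g', 't'] := rfl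
  simp only [hacgt, List.countP_cons, List.countP_nil, pairsB_eq_cp, ind4,
    decide_eq_true_eq, ge_iff_le]
  by_cases h1 : 3 ≤ cp 'a' dna.toList <;> by_cases h2 : 3 ≤ cp 'c' dna.toList <;>
    by_cases h3 : 3 ≤ cp 'g' dna.toList <;> by_cases h4 : 3 ≤ cp 't' dna.toList <;>
    simp [h1, h2, h3, h4]
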